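-- pv_equiv track=rewrite | github.com/Savio-Miranda/Estrutura-de-Dados-II-UFPA-2025 | pythonMaxmin/maxmin3.py | maxmin3
-- ===== SOURCE A (Python) =====
-- def maxmin3(vector: list):
--     """
--     Implementação do algoritmo MaxMin3.
--     Divide os elementos da lista em pares, comparando os elementos entre si
--     e atualizando os valores de máximo e mínimo de forma otimizada.
--     """
--     # Caso a lista tenha apenas um elemento
--     if len(vector) == 1:
--         return vector[0], vector[0]
--
--     # Inicializando os valores de máximo e mínimo
--     if len(vector) % 2 == 0:  # Se o tamanho for par
--         max_val = max(vector[0], vector[1])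
--         min_val = min(vector[0], vector[1])
--         start = 2
--     else:  # Se o tamanho for ímpar
--         max_val = min_val = vector[0]
--         start = 1
--
--     # Percorrendo a lista em pares
--     for i in range(start, len(vector), 2):
--         if vector[i] > vector[i + 1]:
--             max_val = max(max_val, vector[i])
--             min_val = min(min_val, vector[i + 1])
--         else:
--             max_val = max(max_val, vector[i + 1])
--             min_val = min(min_val, vector[i])
--
--     return max_val, min_val
-- ===== SOURCE B (Python) =====
-- def maxmin3(vector: list):
--     if len(vector) <= 2:
--         a = vector[0]
--         b = vector[-1]
--         return (a, b) if a >= b else (b, a)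
--     mid = len(vector) // 2
--     lmax, lmin = maxmin3(vector[:mid])
--     rmax, rmin = maxmin3(vector[mid:])
--     return max(lmax, rmax), min(lmin, rmin)
-- ===== Notes on version B (the rewrite author's own statement) =====
-- stated objective: alternative
-- what changed: Replaces A's pairwise index-stepping loop (start parity setup + range(start, len, 2)) with a recursive divide-and-conquer MaxMin: split at the midpoint, recurse on both halves, combine max-of-maxes and min-of-mins.
import Mathlib
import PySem

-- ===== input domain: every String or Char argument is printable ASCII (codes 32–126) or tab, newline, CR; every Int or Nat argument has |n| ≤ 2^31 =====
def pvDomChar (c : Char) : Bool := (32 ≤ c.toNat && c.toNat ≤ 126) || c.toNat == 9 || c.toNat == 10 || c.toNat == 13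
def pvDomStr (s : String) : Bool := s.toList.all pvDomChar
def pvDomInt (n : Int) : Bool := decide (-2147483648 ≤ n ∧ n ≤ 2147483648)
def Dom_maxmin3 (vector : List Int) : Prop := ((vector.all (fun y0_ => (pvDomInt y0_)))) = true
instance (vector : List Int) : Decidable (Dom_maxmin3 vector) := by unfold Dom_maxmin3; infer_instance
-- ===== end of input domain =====

-- B replaces A's pairwise index loop with recursive divide-and-conquer (alternative, same cost).

-- ===== PORT A =====
-- the loop body: compares vector[i] with vector[i+1] and updates (max_val, min_val)
def bodyA (vector : List Int) (p : Int × Int) (i : Int) : Int × Int :=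
  let a := PySem.List.pyGetD vector i 0
  let b := PySem.List.pyGetD vector (i + 1) 0
  if a > b then (max p.1 a, min p.2 b) else (max p.1 b, min p.2 a)

def maxmin3 (vector : List Int) : Int × Int :=
  if vector.length = 1 then
    (PySem.List.pyGetD vector 0 0, PySem.List.pyGetD vector 0 0)
  else
    -- (max_val, min_val, start) from the parity of len(vector)
    let s : Int × Int × Int :=
      if vector.length % 2 = 0 then
        (max (PySem.List.pyGetD vector 0 0) (PySem.List.pyGetD vector 1 0),
         min (PySem.List.pyGetD vector 0 0) (PySem.List.pyGetD vector 1 0), 2)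
      else
        (PySem.List.pyGetD vector 0 0, PySem.List.pyGetD vector 0 0, 1)
    (PySem.List.pyRange s.2.2 (vector.length : Int) 2).foldl (bodyA vector) (s.1, s.2.1)

-- ===== PORT B =====
def maxmin3_alt (vector : List Int) : Int × Int :=
  if h : vector.length ≤ 2 then
    let a := PySem.List.pyGetD vector 0 0
    let b := PySem.List.pyGetD vector (-1) 0
    if a ≥ b then (a, b) else (b, a)
  else
    let mid : Nat := vector.length / 2
    let l := maxmin3_alt (PySem.List.slice vector none (some (mid : Int)))
    let r := maxmin3_alt (PySem.List.slice vector (some (mid : Int)) none)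
    (max l.1 r.1, min l.2 r.2)
termination_by vector.length
decreasing_by
  · rw [PySem.List.slice_to_natCast]; simp; omega
  · rw [PySem.List.slice_from_natCast]; simp; omega

-- ===== PRECONDITION & SPEC =====
-- Pre_ excludes only the empty list, on which the Python A (and B) raises IndexError.
def Pre_maxmin3 (vector : List Int) : Prop := vector ≠ []
instance (vector : List Int) : Decidable (Pre_maxmin3 vector) := by unfold Pre_maxmin3; infer_instance
def pvWitness_maxmin3 : List Int := ([3, 1, 4, 1, 5])

def Spec_maxmin3 (vector : List Int) (out : Int × Int) : Prop := out = maxmin3_alt vector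
instance (vector : List Int) (out : Int × Int) : Decidable (Spec_maxmin3 vector out) := by unfold Spec_maxmin3; infer_instance

-- ===== CLAIM (what is proved, stated in full; the proofs are below) =====
def Claim_equal_maxmin3 : Prop := ∀ (vector : List Int), Dom_maxmin3 vector → Pre_maxmin3 vector → Spec_maxmin3 vector (maxmin3 vector)

-- ===== LEMMAS AND PROOFS =====

theorem fmax_pull (t : List Int) : ∀ a b : Int, t.foldl max (max a b) = max a (t.foldl max b) := by
  induction t with
  | nil => intro a b; rfl
  | cons c t ih =>
    intro a b
    simp only [List.foldl_cons]
    rw [max_assoc, ih]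

theorem fmin_pull (t : List Int) : ∀ a b : Int, t.foldl min (min a b) = min a (t.foldl min b) := by
  induction t with
  | nil => intro a b; rfl
  | cons c t ih =>
    intro a b
    simp only [List.foldl_cons]
    rw [min_assoc, ih]

theorem pairStep (mx mn a b : Int) :
    (if a > b then (max mx a, min mn b) else (max mx b, min mn a))
      = (max (max mx a) b, min (min mn a) b) := by
  split_ifs with h
  · rw [max_eq_left (le_trans h.le (le_max_right mx a)),
        min_assoc, min_eq_right h.le]
  · push_neg at h
    rw [max_assoc, max_eq_right h, min_assoc, min_eq_left h]

theorem pyRange_two_nil (a b : Int) (h : b ≤ a) : PySem.List.pyRange a b 2 = [] := by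
  rw [PySem.List.pyRange_of_pos a b (by norm_num)]
  rw [if_neg (by omega)]
  rfl

theorem pyRange_two_cons (a b : Int) (h : a < b) :
    PySem.List.pyRange a b 2 = a :: PySem.List.pyRange (a + 2) b 2 := by
  rw [PySem.List.pyRange_of_pos a b (by norm_num),
      PySem.List.pyRange_of_pos (a + 2) b (by norm_num)]
  rw [if_pos h]
  by_cases h2 : a + 2 < b
  · rw [if_pos h2]
    have hn : ((b - a + 2 - 1) / 2).toNat = ((b - (a + 2) + 2 - 1) / 2).toNat + 1 := by omega
    rw [hn, List.range_succ_eq_map]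
    simp only [List.map_cons, List.map_map, Nat.cast_zero, mul_zero, add_zero]
    refine congrArg (List.cons a) ?_
    apply List.map_congr_left
    intro k _
    simp only [Function.comp_apply]
    push_cast
    ring
  · rw [if_neg h2]
    have hn : ((b - a + 2 - 1) / 2).toNat = 1 := by omega
    rw [hn]
    simp

theorem loopA (v : List Int) (mx mn : Int) (start : Nat)
    (hpar : (v.length - start) % 2 = 0) :
    (PySem.List.pyRange (start : Int) (v.length : Int) 2).foldl (bodyA v) (mx, mn)
      = ((v.drop start).foldl max mx, (v.drop start).foldl min mn) := by
  by_cases hlt : start < v.length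
  · have h2 : start + 2 ≤ v.length := by omega
    have ha : start < v.length := hlt
    have hb : start + 1 < v.length := by omega
    rw [pyRange_two_cons _ _ (by exact_mod_cast hlt)]
    rw [List.foldl_cons]
    have hget1 : PySem.List.pyGetD v (start : Int) 0 = v[start] :=
      PySem.List.pyGetD_ofNat v start 0 ha
    have hget2 : PySem.List.pyGetD v ((start : Int) + 1) 0 = v[start + 1] := by
      have : ((start : Int) + 1) = ((start + 1 : Nat) : Int) := by push_cast; ring
      rw [this]
      exact PySem.List.pyGetD_ofNat v (start+1) 0 hb
    have hbody : bodyA v (mx, mn) (start : Int)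
        = (max (max mx v[start]) v[start + 1], min (min mn v[start]) v[start + 1]) := by
      unfold bodyA
      rw [hget1, hget2]
      exact pairStep mx mn v[start] v[start + 1]
    rw [hbody]
    have hc : ((start : Int) + 2) = ((start + 2 : Nat) : Int) := by push_cast; ring
    rw [hc, loopA v _ _ (start + 2) (by omega)]
    have hd : v.drop start = v[start] :: v[start + 1] :: v.drop (start + 2) := by
      rw [List.drop_eq_getElem_cons ha, List.drop_eq_getElem_cons hb]
    rw [hd]
    simp only [List.foldl_cons]
  · rw [pyRange_two_nil _ _ (by exact_mod_cast (by omega : v.length ≤ start))]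
    rw [List.drop_eq_nil_of_le (by omega)]
    rfl
termination_by v.length - start
decreasing_by omega

-- A's value on a nonempty list is (max of all, min of all)
theorem maxmin3_closed (h : Int) (t : List Int) :
    maxmin3 (h :: t) = (t.foldl max h, t.foldl min h) := by
  unfold maxmin3
  by_cases h1 : (h :: t).length = 1
  · have ht : t = [] := by
      cases t with
      | nil => rfl
      | cons a s => simp at h1
    subst ht
    simp [PySem.List.pyGetD_zero_cons]
  · rw [if_neg h1]
    have hlen : 2 ≤ (h :: t).length := by
      cases t with
      | nil => simp at h1
      | cons a s => simp
    by_cases h2 : (h :: t).length % 2 = 0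
    · rw [if_pos h2]
      obtain ⟨a, s, hs⟩ : ∃ a s, t = a :: s := by
        cases t with
        | nil => simp at hlen
        | cons a s => exact ⟨a, s, rfl⟩
      subst hs
      simp only
      have hg0 : PySem.List.pyGetD (h :: a :: s) 0 0 = h := PySem.List.pyGetD_zero_cons _ _ _
      have hg1 : PySem.List.pyGetD (h :: a :: s) 1 0 = a := by
        rw [PySem.List.pyGetD_ofNat' (h :: a :: s) 1 0]
        rfl
      rw [hg0, hg1]
      have hl := loopA (h :: a :: s) (max h a) (min h a) 2 (by omega)
      push_cast at hl
      rw [hl]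
      simp only [List.drop_succ_cons, List.drop_zero, List.foldl_cons]
    · rw [if_neg h2]
      simp only
      have hg0 : PySem.List.pyGetD (h :: t) 0 0 = h := PySem.List.pyGetD_zero_cons _ _ _
      rw [hg0]
      have hl := loopA (h :: t) h h 1 (by omega)
      push_cast at hl
      rw [hl]
      simp only [List.drop_succ_cons, List.drop_zero]

-- B's value on a nonempty list is also (max of all, min of all)
theorem maxmin3_alt_closed (v : List Int) (h : Int) (t : List Int) (hv : v = h :: t) :
    maxmin3_alt v = (t.foldl max h, t.foldl min h) := by
  rw [maxmin3_alt]
  by_cases hle : v.length ≤ 2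
  · rw [dif_pos hle]
    subst hv
    cases t with
    | nil =>
      have hg : PySem.List.pyGetD [h] (-1) 0 = h := by
        rw [PySem.List.pyGetD_neg_one [h] 0 (by simp)]
        rfl
      simp [PySem.List.pyGetD_zero_cons, hg]
    | cons a s =>
      have hs : s = [] := by
        cases s with
        | nil => rfl
        | cons b u => simp at hle
      subst hs
      have hg0 : PySem.List.pyGetD [h, a] 0 0 = h := PySem.List.pyGetD_zero_cons _ _ _
      have hgl : PySem.List.pyGetD [h, a] (-1) 0 = a := by
        rw [PySem.List.pyGetD_neg_one [h, a] 0 (by simp)]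
        rfl
      simp only [hg0, hgl, List.foldl_cons, List.foldl_nil]
      split_ifs with hab
      · rw [max_eq_left hab, min_eq_right hab]
      · push_neg at hab
        rw [max_eq_right hab.le, min_eq_left hab.le]
  · rw [dif_neg hle]
    simp only
    have hmid1 : 1 ≤ v.length / 2 := by omega
    have hmid2 : v.length / 2 < v.length := by omega
    rw [PySem.List.slice_to_natCast, PySem.List.slice_from_natCast]
    obtain ⟨h1, t1, hl⟩ : ∃ h1 t1, v.take (v.length / 2) = h1 :: t1 := by
      cases htk : v.take (v.length / 2) with
      | nil => exfalso; have := congrArg List.length htk; rw [List.length_take, List.length_nil] at this; omega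
      | cons h1 t1 => exact ⟨h1, t1, rfl⟩
    obtain ⟨h2, t2, hr⟩ : ∃ h2 t2, v.drop (v.length / 2) = h2 :: t2 := by
      cases hdp : v.drop (v.length / 2) with
      | nil => exfalso; have := congrArg List.length hdp; rw [List.length_drop, List.length_nil] at this; omega
      | cons h2 t2 => exact ⟨h2, t2, rfl⟩
    rw [maxmin3_alt_closed _ h1 t1 hl, maxmin3_alt_closed _ h2 t2 hr]
    have hsplit : h :: t = h1 :: (t1 ++ h2 :: t2) := by
      rw [← hv, ← List.take_append_drop (v.length / 2) v, hl, hr]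
      simp
    have hh : h = h1 := by injection hsplit
    have htt : t = t1 ++ h2 :: t2 := by injection hsplit with _ h'
    subst hh; subst htt
    simp only [List.foldl_append, List.foldl_cons]
    rw [fmax_pull t2 (t1.foldl max h) h2, fmin_pull t2 (t1.foldl min h) h2]
termination_by v.length
decreasing_by
  · simp only [List.length_take]; omega
  · simp only [List.length_drop]; omega

-- ===== VERDICT (by name: the statement is the Claim_ definition above) =====
theorem maxmin3_spec : Claim_equal_maxmin3 := by
  intro vector _ hpre
  cases vector with
  | nil => exact absurd rfl hpre
  | cons h t =>
    show maxmin3 (h :: t) = maxmin3_alt (h :: t)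
    rw [maxmin3_closed, maxmin3_alt_closed (h :: t) h t rfl]
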